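-- pv_equiv track=rewrite | github.com/MarcValls/bago-framework | .bago/tools/stats.py | section_sprints
-- ===== SOURCE A (Python) =====
-- def section_sprints(sprints: list) -> dict:
--     total = len(sprints)
--     done = sum(1 for s in sprints if s.get("status") == "done")
--     open_s = sum(1 for s in sprints if s.get("status") == "open")
--     return {
--         "total": total,
--         "done": done,
--         "open": open_s,
--     }
-- ===== SOURCE B (Python) =====
-- def section_sprints(sprints: list) -> dict:
--     counts = {}
--     for s in sprints:
--         st = s.get("status")
--         counts[st] = counts.get(st, 0) + 1
--     return {
--         "total": len(sprints),
--         "done": counts.get("done", 0),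
--         "open": counts.get("open", 0),
--     }
-- ===== Notes on version B (the rewrite author's own statement) =====
-- stated objective: alternative
-- what changed: Replaces A's two per-status generator-sum scans with one pass building a status-frequency dictionary, from which the 'done' and 'open' counts are constant-time lookups.
import Mathlib
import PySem

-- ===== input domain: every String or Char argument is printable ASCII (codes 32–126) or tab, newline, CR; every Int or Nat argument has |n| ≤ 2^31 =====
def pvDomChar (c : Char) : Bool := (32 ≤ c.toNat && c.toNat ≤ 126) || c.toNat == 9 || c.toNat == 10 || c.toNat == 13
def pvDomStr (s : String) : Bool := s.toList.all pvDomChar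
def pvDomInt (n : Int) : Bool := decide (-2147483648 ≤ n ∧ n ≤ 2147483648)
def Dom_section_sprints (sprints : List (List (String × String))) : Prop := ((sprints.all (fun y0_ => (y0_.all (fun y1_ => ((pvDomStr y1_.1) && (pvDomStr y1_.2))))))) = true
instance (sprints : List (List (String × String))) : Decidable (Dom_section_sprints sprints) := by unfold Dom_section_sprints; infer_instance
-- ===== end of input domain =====

-- B builds one status-frequency dictionary in a single pass and reads the two counts off it (alternative data structure; same cost).
-- s.get("status") on the assoc-list dict encoding: first matching key (exact for Python dicts, which have unique keys)
def pvGet (s : List (String × String)) : Option String := (s.find? (fun kv => kv.1 == "status")).map (·.2)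

-- ===== PORT A =====
def section_sprints (sprints : List (List (String × String))) : List (String × Int) :=
  let total : Int := sprints.length
  let done : Int := sprints.foldl (fun acc s =>
    if pvGet s == some "done" then acc + 1 else acc) 0
  let open_s : Int := sprints.foldl (fun acc s =>
    if pvGet s == some "open" then acc + 1 else acc) 0
  [("total", total), ("done", done), ("open", open_s)]

-- ===== PORT B =====
def section_sprints_alt (sprints : List (List (String × String))) : List (String × Int) :=
  let counts : PySem.Dict (Option String) Int :=
    sprints.foldl (fun d s => d.modify (pvGet s) 0 (· + 1)) PySem.Dict.empty
  [("total", (sprints.length : Int)),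
   ("done", counts.getD (some "done") 0),
   ("open", counts.getD (some "open") 0)]

-- ===== PRECONDITION & SPEC =====
def Spec_section_sprints (sprints : List (List (String × String))) (out : List (String × Int)) : Prop := out = section_sprints_alt sprints
instance (sprints : List (List (String × String))) (out : List (String × Int)) : Decidable (Spec_section_sprints sprints out) := by unfold Spec_section_sprints; infer_instance

-- ===== CLAIM =====
def Claim_equal_section_sprints : Prop := ∀ (sprints : List (List (String × String))), Dom_section_sprints sprints → Spec_section_sprints sprints (section_sprints sprints)

-- ===== LEMMAS AND PROOFS =====
-- the frequency table's entry for v equals A's count-loop for v, for any status v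
lemma counts_getD (l : List (List (String × String))) (v : String) :
    (l.foldl (fun (d : PySem.Dict (Option String) Int) s => d.modify (pvGet s) 0 (· + 1))
        PySem.Dict.empty).getD (some v) 0
    = l.foldl (fun acc s => if pvGet s == some v then acc + 1 else acc) (0 : Int) := by
  have h : ∀ (d : PySem.Dict (Option String) Int) (a : Int),
      d.getD (some v) 0 = a →
      (l.foldl (fun d s => d.modify (pvGet s) 0 (· + 1)) d).getD (some v) 0
      = l.foldl (fun acc s => if pvGet s == some v then acc + 1 else acc) a := by
    induction l with
    | nil => intro d a h; simpa [List.foldl] using h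
    | cons s t ih =>
        intro d a h
        simp only [List.foldl]
        by_cases hv : pvGet s = some v
        · refine ih _ _ ?_
          rw [hv, PySem.Dict.getD_modify_self, h]
          simp
        · refine ih _ _ ?_
          rw [PySem.Dict.getD_modify, if_neg (fun heq => hv heq.symm), h]
          have : (pvGet s == some v) = false := by
            simpa [beq_iff_eq] using hv
          simp [this]
  exact h _ _ rfl

-- ===== VERDICT =====
theorem section_sprints_spec : Claim_equal_section_sprints := by
  intro sprints _
  show section_sprints sprints = section_sprints_alt sprints
  unfold section_sprints section_sprints_alt
  simp only []
  rw [counts_getD, counts_getD]
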